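-- pv_equiv track=rewrite | github.com/BG6FGV/MMS-Preview | analyze_14200.py | read_uintvar
-- ===== SOURCE A (Python) =====
-- def read_uintvar(data, pos):
--     result = 0
--     while pos < len(data):
--         b = data[pos]
--         result = (result << 7) | (b & 0x7F)
--         pos += 1
--         if not (b & 0x80):
--             return result, pos
--     return result, pos
-- ===== SOURCE B (Python) =====
-- def read_uintvar(data, pos):
--     # Two phases: first locate the end position of the varint, then fold
--     # the 7-bit payloads over that index range.
--     n = len(data)
--     end = pos
--     while end < n and data[end] & 0x80:
--         end += 1
--     if end < n:
--         end += 1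
--     result = 0
--     for i in range(pos, end):
--         result = (result << 7) | (data[i] & 0x7F)
--     return result, end
-- ===== Notes on version B (the rewrite author's own statement) =====
-- stated objective: alternative
-- what changed: Splits the single accumulate-and-test loop into two phases: a scan that only finds the end index of the varint, then a separate fold of the 7-bit payloads over range(pos, end).
import Mathlib
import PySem

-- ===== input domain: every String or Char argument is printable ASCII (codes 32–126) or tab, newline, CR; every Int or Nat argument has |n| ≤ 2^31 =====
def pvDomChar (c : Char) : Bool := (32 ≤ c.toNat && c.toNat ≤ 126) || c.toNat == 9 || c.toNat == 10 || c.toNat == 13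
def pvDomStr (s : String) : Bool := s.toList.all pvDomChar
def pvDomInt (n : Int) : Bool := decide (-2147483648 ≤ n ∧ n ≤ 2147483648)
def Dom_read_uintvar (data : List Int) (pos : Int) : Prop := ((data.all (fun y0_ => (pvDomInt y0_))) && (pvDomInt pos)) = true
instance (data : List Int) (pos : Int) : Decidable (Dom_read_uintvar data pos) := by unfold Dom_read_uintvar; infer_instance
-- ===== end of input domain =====

-- B changes the decomposition only (same cost): one find-the-end scan, then a fold of payloads over the index range.

-- ===== PORT A =====
-- while loop of A: accumulate result, early return when the continuation bit is clear.
def read_uintvar_go (data : List Int) (pos : Int) (result : Int) : Int × Int :=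
  if _h : pos < (data.length : Int) then
    let b := (PySem.List.pyGet? data pos).getD 0   -- none = IndexError, excluded by Pre_
    let result' := PySem.Int.bor (result <<< 7) (PySem.Int.band b 0x7F)
    if PySem.Int.band b 0x80 = 0 then (result', pos + 1)
    else read_uintvar_go data (pos + 1) result'
  else (result, pos)
termination_by ((data.length : Int) - pos).toNat
decreasing_by omega

def read_uintvar (data : List Int) (pos : Int) : Int × Int :=
  read_uintvar_go data pos 0

-- ===== PORT B =====
-- phase one of B: advance while the continuation bit is set.
def read_uintvar_alt_scan (data : List Int) (e : Int) : Int :=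
  if _h : e < (data.length : Int) ∧ PySem.Int.band ((PySem.List.pyGet? data e).getD 0) 0x80 ≠ 0 then
    read_uintvar_alt_scan data (e + 1)
  else e
termination_by ((data.length : Int) - e).toNat
decreasing_by omega

def read_uintvar_alt (data : List Int) (pos : Int) : Int × Int :=
  let n : Int := data.length
  let e := read_uintvar_alt_scan data pos
  let e' := if e < n then e + 1 else e
  let result := (PySem.List.pyRange pos e' 1).foldl
    (fun acc i => PySem.Int.bor (acc <<< 7) (PySem.Int.band ((PySem.List.pyGet? data i).getD 0) 0x7F)) 0
  (result, e')

-- ===== PRECONDITION & SPEC =====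
-- Pre_ excludes exactly the inputs where A raises IndexError (pos < -len(data) with pos < len(data)).
def Pre_read_uintvar (data : List Int) (pos : Int) : Prop := -(data.length : Int) ≤ pos
instance (data : List Int) (pos : Int) : Decidable (Pre_read_uintvar data pos) := by unfold Pre_read_uintvar; infer_instance
def pvWitness_read_uintvar : List Int × Int := ([0x81, 0x02, 0x05], 0)
def Spec_read_uintvar (data : List Int) (pos : Int) (out : Int × Int) : Prop := out = read_uintvar_alt data pos
instance (data : List Int) (pos : Int) (out : Int × Int) : Decidable (Spec_read_uintvar data pos out) := by unfold Spec_read_uintvar; infer_instance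

-- ===== CLAIM (what is proved, stated in full; the proofs are below) =====
def Claim_equal_read_uintvar : Prop := ∀ (data : List Int) (pos : Int), Dom_read_uintvar data pos → Pre_read_uintvar data pos → Spec_read_uintvar data pos (read_uintvar data pos)

-- ===== LEMMAS AND PROOFS =====

theorem scan_ge (data : List Int) (e : Int) : e ≤ read_uintvar_alt_scan data e := by
  fun_induction read_uintvar_alt_scan data e with
  | case1 e h ih => omega
  | case2 e h => omega

-- The key invariant: the accumulating loop of A equals B's fold over the remaining range.
theorem go_eq (data : List Int) (pos r : Int) :
    read_uintvar_go data pos r =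
      (let e := read_uintvar_alt_scan data pos
       let e' := if e < (data.length : Int) then e + 1 else e
       ((PySem.List.pyRange pos e' 1).foldl
          (fun acc i => PySem.Int.bor (acc <<< 7) (PySem.Int.band ((PySem.List.pyGet? data i).getD 0) 0x7F)) r, e')) := by
  simp only []
  fun_induction read_uintvar_go data pos r with
  | case1 pos r h b r' hb =>
    rw [read_uintvar_alt_scan]
    simp [h, hb, PySem.List.pyRange_one_singleton, b, r']
  | case2 pos r h b r' hb ih =>
    have hs : read_uintvar_alt_scan data pos = read_uintvar_alt_scan data (pos + 1) := by
      rw [read_uintvar_alt_scan]; simp [h, hb, b]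
    have hge := scan_ge data (pos + 1)
    rw [ih, hs]
    have hlt : pos < read_uintvar_alt_scan data (pos + 1) := by omega
    have hcons : ∀ e', pos < e' → PySem.List.pyRange pos e' 1 = pos :: PySem.List.pyRange (pos+1) e' 1 :=
      fun e' h' => PySem.List.pyRange_one_cons h'
    split_ifs with hl
    · rw [hcons _ (by omega)]; simp [b, r']
    · rw [hcons _ (by omega)]; simp [b, r']
  | case3 pos r h =>
    rw [read_uintvar_alt_scan]
    simp [h, PySem.List.pyRange_one_eq_nil (by omega : (pos:Int) ≤ pos)]

-- ===== VERDICT (by name: the statement is the Claim_ definition above) =====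
theorem read_uintvar_spec : Claim_equal_read_uintvar := by
  intro data pos _ _
  unfold Spec_read_uintvar read_uintvar read_uintvar_alt
  simpa using go_eq data pos 0
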